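-- pv_equiv track=rewrite | github.com/de-ritchie/dsa_python | src/dp/dimension_1/d_byte_landian.py | bytelandian_dp
-- ===== SOURCE A (Python) =====
-- def bytelandian_dp(n):
--
--     arr = [-1 for i in range(n + 1)]
--     arr[0] = 0
--
--     for i in range(1, n+1):
--
--         d1 = arr[i//2]
--         d2 = arr[i//3]
--         d3 = arr[i//4]
--
--         arr[i] = max(d1 + d2 + d3, i)
--
--     return arr[n]
-- ===== SOURCE B (Python) =====
-- def bytelandian_dp(n):
--     memo = {0: 0}
--
--     def best(k):
--         if k in memo:
--             return memo[k]
--         v = max(best(k // 2) + best(k // 3) + best(k // 4), k)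
--         memo[k] = v
--         return v
--
--     return best(n)
-- ===== Notes on version B (the rewrite author's own statement) =====
-- stated objective: faster
-- what changed: Replaced A's bottom-up table over every value up to n by top-down memoized recursion (dict memo) that visits only the reachable states n//(2^a*3^b*4^c).
import Mathlib
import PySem

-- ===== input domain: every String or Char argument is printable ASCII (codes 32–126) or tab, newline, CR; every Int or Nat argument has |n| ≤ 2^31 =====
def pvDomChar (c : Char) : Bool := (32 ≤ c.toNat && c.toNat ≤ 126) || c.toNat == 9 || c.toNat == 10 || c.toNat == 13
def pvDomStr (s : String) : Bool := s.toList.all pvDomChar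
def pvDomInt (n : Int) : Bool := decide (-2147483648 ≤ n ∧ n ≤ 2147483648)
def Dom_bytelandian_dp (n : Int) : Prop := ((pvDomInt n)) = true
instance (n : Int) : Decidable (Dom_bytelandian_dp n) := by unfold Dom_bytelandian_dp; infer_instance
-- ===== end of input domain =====

-- B replaces A's O(n) bottom-up table with top-down memoized recursion over only the
-- reachable states n//(2^a*3^b*4^c) (objective: faster, asymptotic); return value only.

-- ===== PORT A =====
-- bottom-up table, literal port of Source A
def bytelandian_dp (n : Int) : Int :=
  let arr := (PySem.List.pyRange 0 (n + 1) 1).map (fun _ => (-1 : Int))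
  let arr := PySem.List.pySetD arr 0 0
  let arr := (PySem.List.pyRange 1 (n + 1) 1).foldl (fun arr i =>
      let d1 := PySem.List.pyGetD arr (PySem.Int.floordiv i 2) 0
      let d2 := PySem.List.pyGetD arr (PySem.Int.floordiv i 3) 0
      let d3 := PySem.List.pyGetD arr (PySem.Int.floordiv i 4) 0
      PySem.List.pySetD arr i (max (d1 + d2 + d3) i)) arr
  PySem.List.pyGetD arr n 0

-- ===== PORT B =====
-- best(k) of Source B: memo-dict top-down recursion; the fuel argument only makes the
-- recursion structural (fuel n.toNat+1 always suffices, proved below).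
def bdBest : Nat → Int → PySem.Dict Int Int → Int × PySem.Dict Int Int
  | 0, _, memo => (0, memo)
  | fuel + 1, k, memo =>
    match memo.get? k with
    | some v => (v, memo)
    | none =>
      let (v1, memo) := bdBest fuel (PySem.Int.floordiv k 2) memo
      let (v2, memo) := bdBest fuel (PySem.Int.floordiv k 3) memo
      let (v3, memo) := bdBest fuel (PySem.Int.floordiv k 4) memo
      let v := max (v1 + v2 + v3) k
      (v, memo.insert k v)

def bytelandian_dp_alt (n : Int) : Int :=
  (bdBest (n.toNat + 1) n (PySem.Dict.ofList [((0 : Int), (0 : Int))])).1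

-- ===== PRECONDITION & SPEC =====
-- Pre_ excludes n < 0: there A raises IndexError (arr[0] = 0 on an empty list).
def Pre_bytelandian_dp (n : Int) : Prop := 0 ≤ n
instance (n : Int) : Decidable (Pre_bytelandian_dp n) := by unfold Pre_bytelandian_dp; infer_instance
def pvWitness_bytelandian_dp : Int := 12

def Spec_bytelandian_dp (n : Int) (out : Int) : Prop := out = bytelandian_dp_alt n
instance (n : Int) (out : Int) : Decidable (Spec_bytelandian_dp n out) := by unfold Spec_bytelandian_dp; infer_instance

-- ===== CLAIM (what is proved, stated in full; the proofs are below) =====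
def Claim_equal_bytelandian_dp : Prop := ∀ (n : Int), Dom_bytelandian_dp n → Pre_bytelandian_dp n → Spec_bytelandian_dp n (bytelandian_dp n)

-- ===== LEMMAS AND PROOFS =====

-- mathematical characterisation: the Bytelandian value function
def bl (n : Int) : Int :=
  if n ≤ 0 then 0
  else max (bl (n / 2) + bl (n / 3) + bl (n / 4)) n
termination_by n.toNat
decreasing_by all_goals omega

lemma bl_nonpos {n : Int} (h : n ≤ 0) : bl n = 0 := by rw [bl]; simp [h]

lemma bl_pos {n : Int} (h : 1 ≤ n) :
    bl n = max (bl (n / 2) + bl (n / 3) + bl (n / 4)) n := by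
  rw [bl]; simp [show ¬ n ≤ 0 by omega]

-- ---- A-side: loop invariant ----

def blStep (arr : List Int) (i : Int) : List Int :=
  let d1 := PySem.List.pyGetD arr (PySem.Int.floordiv i 2) 0
  let d2 := PySem.List.pyGetD arr (PySem.Int.floordiv i 3) 0
  let d3 := PySem.List.pyGetD arr (PySem.Int.floordiv i 4) 0
  PySem.List.pySetD arr i (max (d1 + d2 + d3) i)

def blInit (n : Int) : List Int :=
  PySem.List.pySetD ((PySem.List.pyRange 0 (n + 1) 1).map (fun _ => (-1 : Int))) 0 0

lemma blInit_len (n : Int) : (blInit n).length = (n + 1).toNat := by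
  simp [blInit, PySem.List.length_pyRange_one]

lemma loopA (n : Int) (hn : 0 ≤ n) (m : Nat) (hm : (m : Int) ≤ n) :
    let arr := (PySem.List.pyRange 1 ((m : Int) + 1) 1).foldl blStep (blInit n)
    arr.length = (n + 1).toNat ∧
      ∀ j : Int, 0 ≤ j → j ≤ (m : Int) → PySem.List.pyGetD arr j 0 = bl j := by
  induction m with
  | zero =>
    intro arr
    constructor
    · simpa [arr, PySem.List.pyRange_one_eq_nil (by omega : (1:Int) ≤ 0 + 1)] using blInit_len n
    · intro j hj0 hj1
      have hj : j = 0 := by omega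
      subst hj
      have h0 : (0 : Nat) < ((PySem.List.pyRange 0 (n + 1) 1).map (fun _ => (-1 : Int))).length := by
        simp [PySem.List.length_pyRange_one]; omega
      simp only [arr, blInit, Nat.cast_zero]
      rw [PySem.List.pyRange_one_eq_nil (by omega : (0:Int) + 1 ≤ 1), List.foldl_nil]
      rw [show (0:Int) = ((0:Nat):Int) from rfl, PySem.List.pySetD_natCast,
        show ((0:Nat):Int) = ((0:Nat):Int) from rfl, PySem.List.pyGetD_natCast]
      simp [List.getD, hn, bl_nonpos (le_refl (0:Int))]
  | succ m ih =>
    intro arr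
    have hm' : (m : Int) ≤ n := by push_cast at hm ⊢; omega
    obtain ⟨ihlen, ihval⟩ := ih hm'
    have hsplit : PySem.List.pyRange 1 ((m : Int) + 1 + 1) 1
        = PySem.List.pyRange 1 ((m : Int) + 1) 1 ++ [(m : Int) + 1] :=
      PySem.List.pyRange_one_succ_right (by omega)
    set arr0 := (PySem.List.pyRange 1 ((m : Int) + 1) 1).foldl blStep (blInit n) with harr0
    have harr : arr = blStep arr0 ((m : Int) + 1) := by
      simp only [arr, harr0]
      rw [show ((↑(m + 1) : Int) + 1) = (m : Int) + 1 + 1 by push_cast; ring, hsplit,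
        List.foldl_append, List.foldl_cons, List.foldl_nil]
    set i : Int := (m : Int) + 1 with hi
    have hi1 : 1 ≤ i := by omega
    have hr2 : PySem.List.pyGetD arr0 (PySem.Int.floordiv i 2) 0 = bl (i / 2) := by
      rw [PySem.Int.floordiv_eq_ediv_of_pos (by omega : (0:Int) < 2)]
      exact ihval _ (by omega) (by omega)
    have hr3 : PySem.List.pyGetD arr0 (PySem.Int.floordiv i 3) 0 = bl (i / 3) := by
      rw [PySem.Int.floordiv_eq_ediv_of_pos (by omega : (0:Int) < 3)]
      exact ihval _ (by omega) (by omega)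
    have hr4 : PySem.List.pyGetD arr0 (PySem.Int.floordiv i 4) 0 = bl (i / 4) := by
      rw [PySem.Int.floordiv_eq_ediv_of_pos (by omega : (0:Int) < 4)]
      exact ihval _ (by omega) (by omega)
    have hlen : arr.length = (n + 1).toNat := by
      rw [harr]; simp only [blStep]
      rw [PySem.List.pySetD_of_nonneg _ _ (show (0:Int) ≤ i by omega)]
      simp [ihlen]
    refine ⟨hlen, ?_⟩
    intro j hj0 hj1
    have hiN : i.toNat < arr0.length := by rw [ihlen]; push_cast at hm; omega
    rw [harr]
    simp only [blStep]
    rw [hr2, hr3, hr4, PySem.List.pySetD_of_nonneg _ _ (show (0:Int) ≤ i by omega)]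
    have hlen2 : (arr0.set i.toNat (max (bl (i / 2) + bl (i / 3) + bl (i / 4)) i)).length
        = arr0.length := List.length_set ..
    have hjlt : j.toNat < arr0.length := by rw [ihlen]; push_cast at hj1 hm; omega
    rw [PySem.List.pyGetD_eq_getElem _ _ hj0 (by rw [hlen2]; omega)]
    by_cases hji : j = i
    · subst hji
      rw [List.getElem_set_self]
      rw [bl_pos hi1]
    · have hjm : j ≤ (m : Int) := by push_cast at hj1; omega
      rw [List.getElem_set_ne (by omega)]
      have := ihval j hj0 hjm
      rw [PySem.List.pyGetD_eq_getElem _ _ hj0 (by omega)] at this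
      exact this

lemma portA_eq_bl (n : Int) (hn : 0 ≤ n) : bytelandian_dp n = bl n := by
  have h := loopA n hn n.toNat (by omega)
  simp only at h
  obtain ⟨hlen, hval⟩ := h
  have hcast : ((n.toNat : Int)) = n := by omega
  rw [hcast] at hval
  unfold bytelandian_dp
  exact hval n hn (le_refl n)

-- ---- B-side: memo-dict invariant ----

def MemoOK (d : PySem.Dict Int Int) : Prop :=
  d.get? 0 = some 0 ∧ ∀ k v : Int, d.get? k = some v → v = bl k

lemma memoOK_init : MemoOK (PySem.Dict.ofList [((0 : Int), (0 : Int))]) := by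
  constructor
  · decide
  · intro k v h
    have he : PySem.Dict.ofList [((0 : Int), (0 : Int))]
        = (PySem.Dict.empty).insert 0 0 := by decide
    rw [he] at h
    by_cases hk : k = 0
    · subst hk
      simp only [PySem.Dict.get?_insert_self, Option.some.injEq] at h
      rw [← h, bl_nonpos (le_refl (0:Int))]
    · rw [PySem.Dict.get?_insert_of_ne _ _ hk, PySem.Dict.get?_empty] at h
      exact absurd h (by simp)

lemma memoOK_insert {d : PySem.Dict Int Int} (hd : MemoOK d) {k v : Int}
    (hk : k ≠ 0) (hv : v = bl k) : MemoOK (d.insert k v) := by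
  obtain ⟨h0, hall⟩ := hd
  constructor
  · rw [PySem.Dict.get?_insert_of_ne _ _ (Ne.symm hk)]; exact h0
  · intro k' v' h
    by_cases hkk : k' = k
    · subst hkk
      simp only [PySem.Dict.get?_insert_self, Option.some.injEq] at h
      rw [← h]; exact hv
    · rw [PySem.Dict.get?_insert_of_ne _ _ hkk] at h
      exact hall _ _ h

lemma bdBest_correct : ∀ (fuel : Nat) (k : Int) (d : PySem.Dict Int Int),
    0 ≤ k → k.toNat < fuel → MemoOK d →
    (bdBest fuel k d).1 = bl k ∧ MemoOK (bdBest fuel k d).2 := by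
  intro fuel
  induction fuel with
  | zero => intro k d _ hf _; omega
  | succ fuel ih =>
    intro k d hk hf hd
    rw [bdBest]
    cases hget : d.get? k with
    | some v => exact ⟨hd.2 _ _ hget, hd⟩
    | none =>
      have hk1 : 1 ≤ k := by
        rcases lt_or_ge k 1 with h | h
        · exfalso; have : k = 0 := by omega
          rw [this, hd.1] at hget; cases hget
        · exact h
      have hsub2 : 0 ≤ PySem.Int.floordiv k 2 ∧ (PySem.Int.floordiv k 2).toNat < fuel := by
        rw [PySem.Int.floordiv_eq_ediv_of_pos (by omega : (0:Int) < 2)]; omega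
      have hsub3 : 0 ≤ PySem.Int.floordiv k 3 ∧ (PySem.Int.floordiv k 3).toNat < fuel := by
        rw [PySem.Int.floordiv_eq_ediv_of_pos (by omega : (0:Int) < 3)]; omega
      have hsub4 : 0 ≤ PySem.Int.floordiv k 4 ∧ (PySem.Int.floordiv k 4).toNat < fuel := by
        rw [PySem.Int.floordiv_eq_ediv_of_pos (by omega : (0:Int) < 4)]; omega
      obtain ⟨h20, h2f⟩ := hsub2
      obtain ⟨h30, h3f⟩ := hsub3
      obtain ⟨h40, h4f⟩ := hsub4
      obtain ⟨e1, m1⟩ := ih _ d h20 h2f hd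
      obtain ⟨e2, m2⟩ := ih _ _ h30 h3f m1
      obtain ⟨e3, m3⟩ := ih _ _ h40 h4f m2
      simp only
      constructor
      · rw [e1, e2, e3, bl_pos hk1,
          PySem.Int.floordiv_eq_ediv_of_pos (by omega : (0:Int) < 2),
          PySem.Int.floordiv_eq_ediv_of_pos (by omega : (0:Int) < 3),
          PySem.Int.floordiv_eq_ediv_of_pos (by omega : (0:Int) < 4)]
      · apply memoOK_insert m3 (by omega)
        rw [e1, e2, e3, bl_pos hk1,
          PySem.Int.floordiv_eq_ediv_of_pos (by omega : (0:Int) < 2),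
          PySem.Int.floordiv_eq_ediv_of_pos (by omega : (0:Int) < 3),
          PySem.Int.floordiv_eq_ediv_of_pos (by omega : (0:Int) < 4)]

lemma portB_eq_bl (n : Int) (hn : 0 ≤ n) : bytelandian_dp_alt n = bl n :=
  (bdBest_correct (n.toNat + 1) n _ hn (by omega) memoOK_init).1

-- ===== VERDICT (by name: the statement is the Claim_ definition above) =====
theorem bytelandian_dp_spec : Claim_equal_bytelandian_dp := by
  intro n _ hpre
  unfold Spec_bytelandian_dp
  rw [portA_eq_bl n hpre, portB_eq_bl n hpre]
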